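-- pv_equiv track=rewrite | github.com/chminipark/algorithm | Programmers/kakao/2018 KAKAO BLIND RECRUITMENT/1차 다트 게임.py | Dart_separ
-- ===== SOURCE A (Python) =====
-- def Dart_separ(dart):
--     q_list = []
--     s = 0
--     for i in range(1, len(dart)):
--         if dart[i-1].isdecimal():
--             continue
--         if len(q_list) == 2:
--             break
--         if dart[i].isdecimal():
--             q_list.append(dart[s:i])
--             s = i
--     q_list.append(dart[s:])
--
--     return q_list
-- ===== SOURCE B (Python) =====
-- def Dart_separ(dart):
--     # streaming builder: one pass over characters, growing the current segment
--     segs = []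
--     cur = ""
--     for ch in dart:
--         if ch.isdecimal() and cur and not cur[-1].isdecimal() and len(segs) < 2:
--             segs.append(cur)
--             cur = ""
--         cur += ch
--     segs.append(cur)
--     return segs
-- ===== Notes on version B (the rewrite author's own statement) =====
-- stated objective: alternative
-- what changed: A's index loop over range(1, len(dart)) with continue/break and slicing dart[s:i] is replaced by an index-free streaming builder: one pass over the characters themselves that grows the current segment char by char and cuts it when a digit follows a non-digit (at most twice); no indices or slices are used at all.
import Mathlib
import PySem

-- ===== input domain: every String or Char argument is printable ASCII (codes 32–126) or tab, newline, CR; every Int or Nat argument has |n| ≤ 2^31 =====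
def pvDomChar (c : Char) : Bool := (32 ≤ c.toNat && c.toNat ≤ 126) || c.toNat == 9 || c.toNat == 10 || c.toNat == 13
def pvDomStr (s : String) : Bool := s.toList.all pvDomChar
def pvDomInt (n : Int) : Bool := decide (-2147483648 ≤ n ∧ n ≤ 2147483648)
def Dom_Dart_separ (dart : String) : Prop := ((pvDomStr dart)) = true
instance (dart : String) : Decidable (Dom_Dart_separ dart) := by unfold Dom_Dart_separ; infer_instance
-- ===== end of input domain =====

-- B replaces A's index loop with slicing by a streaming one-pass builder: it walks
-- the characters themselves (no indices, no slices) and grows the current segment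
-- char by char, cutting when a digit follows a non-digit; objective: alternative.
-- isdecimal is ported as PySem.Chars.isdigit — exact on the ASCII domain (Dom).

-- ===== PORT A =====
-- A's for-loop over range(1, len(dart)) with continue/break, state (q_list, s);
-- break returns the state early.  dart[i] and dart[i-1] are always in range inside
-- the loop (1 ≤ i < len), so pyGetD with a dummy default ' ' is exact here.
def dartLoopA (cs : List Char) : List Int → List String × Int → List String × Int
  | [], st => st
  | i :: rest, (q, s) =>
    if PySem.Chars.isdigit (PySem.List.pyGetD cs (i - 1) ' ') then
      dartLoopA cs rest (q, s)                       -- continue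
    else if q.length = 2 then (q, s)                 -- break
    else if PySem.Chars.isdigit (PySem.List.pyGetD cs i ' ') then
      dartLoopA cs rest (q ++ [String.ofList (PySem.List.slice cs (some s) (some i))], i)
    else dartLoopA cs rest (q, s)

def Dart_separ (dart : String) : List String :=
  let cs := dart.toList
  let st := dartLoopA cs (PySem.List.pyRange 1 (PySem.List.len cs)) ([], 0)
  st.1 ++ [String.ofList (PySem.List.slice cs (some st.2) none)]

-- ===== PORT B =====
-- B's loop body: state (segs, cur); cur[-1] is Python's negative index
-- (PySem.List.pyGetD cur (-1)), guarded by 'cur' being nonempty exactly as in Source B.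
def dartStepB (st : List String × List Char) (ch : Char) : List String × List Char :=
  if PySem.Chars.isdigit ch && !st.2.isEmpty
      && !(PySem.Chars.isdigit (PySem.List.pyGetD st.2 (-1) ' '))
      && decide (st.1.length < 2) then
    (st.1 ++ [String.ofList st.2], [ch])
  else (st.1, st.2 ++ [ch])

def Dart_separ_alt (dart : String) : List String :=
  let st := dart.toList.foldl dartStepB ([], [])
  st.1 ++ [String.ofList st.2]

-- ===== PRECONDITION & SPEC =====
def Spec_Dart_separ (dart : String) (out : List String) : Prop := out = Dart_separ_alt dart
instance (dart : String) (out : List String) : Decidable (Spec_Dart_separ dart out) := by unfold Spec_Dart_separ; infer_instance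

-- ===== CLAIM (what is proved, stated in full; the proofs are below) =====
def Claim_equal_Dart_separ : Prop := ∀ (dart : String), Dom_Dart_separ dart → Spec_Dart_separ dart (Dart_separ dart)

-- ===== LEMMAS AND PROOFS =====

-- Python's cur[-1] on a nonempty list is its last element.
theorem pyGetD_neg_one {α : Type} (l : List α) (d : α) (h : l ≠ []) :
    PySem.List.pyGetD l (-1) d = l.getLast h := by
  have hl : 0 < l.length := List.length_pos_iff.mpr h
  simp [PySem.List.pyGetD, PySem.List.pyGet?, PySem.List.pyIdx?, hl,
    show -(l.length:Int) ≤ -1 by omega, List.getLast_eq_getElem]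

-- Once two segments have been emitted, B's fold only accumulates characters.
theorem foldB_saturated (rest : List Char) : ∀ (q : List String) (cur : List Char),
    2 ≤ q.length → rest.foldl dartStepB (q, cur) = (q, cur ++ rest) := by
  induction rest with
  | nil => intro q cur _; simp
  | cons c t ih =>
    intro q cur hq
    have : ¬ q.length < 2 := by omega
    simp only [List.foldl_cons, dartStepB, this, decide_false, Bool.and_false,
      if_false, Bool.false_eq_true]
    rw [ih q (cur ++ [c]) hq]; simp

theorem extract_snoc (cs : List Char) (s j : Nat) (hs : s ≤ j) (hj : j < cs.length) :
    cs.extract s j ++ [cs[j]] = cs.extract s (j + 1) := by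
  rw [List.extract_eq_take_drop, List.extract_eq_take_drop,
    show j + 1 - s = (j - s) + 1 by omega, List.take_add_one]
  have h1 : j - s < (cs.drop s).length := by simp; omega
  rw [List.getElem?_eq_getElem h1]
  simp [List.getElem_drop, show s + (j - s) = j by omega]

-- Main invariant: A's loop from index j with state (q, s) and B's fold over the
-- remaining characters with current segment dart[s:j] produce the same final list.
theorem dart_main (cs : List Char) : ∀ (k j s : Nat) (q : List String),
    k = cs.length - j → 1 ≤ j → s < j → j ≤ cs.length → q.length ≤ 2 →
    (let st := dartLoopA cs (PySem.List.pyRange (j:Int) (cs.length:Int)) (q, (s:Int));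
     st.1 ++ [String.ofList (PySem.List.slice cs (some st.2) none)])
    = (let st2 := (cs.drop j).foldl dartStepB (q, cs.extract s j);
       st2.1 ++ [String.ofList st2.2]) := by
  intro k
  induction k with
  | zero =>
    intro j s q hk h1 hs hj hq
    have hje : j = cs.length := by omega
    subst hje
    have hr : PySem.List.pyRange (cs.length:Int) (cs.length:Int) = [] := by
      simp [PySem.List.pyRange]
    rw [hr]
    simp only [dartLoopA, List.drop_length, List.foldl_nil]
    rw [PySem.List.slice_from cs (by positivity), List.extract_eq_take_drop]
    simp only [Int.toNat_natCast]
    rw [List.take_of_length_le (by simp)]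
  | succ k ih =>
    intro j s q hk h1 hs hj hq
    have hjlt : j < cs.length := by omega
    have hjm : j - 1 < cs.length := by omega
    rw [PySem.List.pyRange_one_cons (by exact_mod_cast hjlt)]
    have hgm1 : PySem.List.pyGetD cs ((j:Int) - 1) ' ' = cs[j-1] := by
      rw [show (j:Int) - 1 = ((j - 1 : Nat) : Int) by omega, PySem.List.pyGetD_natCast,
        List.getD_eq_getElem cs ' ' hjm]
    have hg : PySem.List.pyGetD cs (j:Int) ' ' = cs[j] := by
      rw [PySem.List.pyGetD_natCast, List.getD_eq_getElem cs ' ' hjlt]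
    rw [List.drop_eq_getElem_cons hjlt]
    have hlen : (cs.extract s j).length = j - s := by
      simp [List.extract_eq_take_drop]; omega
    have hne : cs.extract s j ≠ [] := by
      intro h; rw [h] at hlen; simp at hlen; omega
    have hie : (cs.extract s j).isEmpty = false := by simpa using hne
    have hcurneg : PySem.List.pyGetD (cs.extract s j) (-1) ' ' = cs[j-1] := by
      rw [pyGetD_neg_one _ _ hne]
      apply Option.some.inj
      rw [← List.getLast?_eq_getLast, List.getLast?_eq_getElem?, hlen]
      rw [List.getElem?_eq_getElem (by omega)]
      simp only [List.extract_eq_take_drop, List.getElem_take, List.getElem_drop]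
      simp only [show s + (j - s - 1) = j - 1 by omega]
    have hsnoc := extract_snoc cs s j (by omega) hjlt
    have hsucc : ((j:Int) + 1) = ((j+1 : Nat) : Int) := by push_cast; ring
    simp only [List.foldl_cons, dartStepB, hcurneg, hie, Bool.not_false, Bool.and_true]
    by_cases hp : PySem.Chars.isdigit cs[j-1] = true
    · -- dart[j-1] is a digit: A continues, B does not cut
      simp only [dartLoopA, hgm1, hp, if_true, Bool.not_true, Bool.and_false,
        Bool.false_and, Bool.false_eq_true, if_false, hsnoc, hsucc]
      exact ih (j+1) s q (by omega) (by omega) (by omega) (by omega) hq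
    · have hpf : PySem.Chars.isdigit cs[j-1] = false := by simpa using hp
      by_cases h2 : q.length = 2
      · -- A breaks; B never cuts again
        have hd2 : (decide ((2:Nat) < 2)) = false := by decide
        simp only [dartLoopA, hgm1, hpf, Bool.false_eq_true, if_false, h2, if_true,
          Bool.not_false, hd2, Bool.and_false, hsnoc]
        rw [foldB_saturated _ q _ (by omega)]
        rw [PySem.List.slice_from cs (by positivity)]
        simp only [Int.toNat_natCast]
        congr 2
        have h1 : cs.drop (j+1) = (cs.drop s).drop (j+1-s) := by
          rw [List.drop_drop]; congr 1; omega
        have hjoin : cs.extract s (j+1) ++ cs.drop (j+1) = cs.drop s := by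
          rw [List.extract_eq_take_drop, h1, List.take_append_drop]
        rw [hjoin]
      · have hlt : q.length < 2 := by omega
        by_cases hc : PySem.Chars.isdigit cs[j] = true
        · -- digit after non-digit with fewer than two cuts: both cut at j
          simp only [dartLoopA, hgm1, hpf, Bool.false_eq_true, if_false, h2, hg, hc,
            if_true, hlt, decide_true, Bool.and_true, Bool.not_false, hsucc]
          have hslice : PySem.List.slice cs (some (s:Int)) (some (j:Int)) = cs.extract s j := by
            rw [PySem.List.slice_natCast, List.extract_eq_take_drop]
          rw [hslice]
          have hext1 : [cs[j]] = cs.extract j (j+1) := by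
            rw [List.extract_eq_take_drop, show j + 1 - j = 1 by omega,
              List.drop_eq_getElem_cons hjlt]
            rfl
          rw [hext1]
          exact ih (j+1) j (q ++ [String.ofList (cs.extract s j)]) (by omega) (by omega)
            (by omega) (by omega) (by simp; omega)
        · -- no digit at j: neither side changes its segments
          have hcf : PySem.Chars.isdigit cs[j] = false := by simpa using hc
          simp only [dartLoopA, hgm1, hpf, Bool.false_eq_true, if_false, h2, hg, hcf,
            Bool.false_and, hsnoc, hsucc]
          exact ih (j+1) s q (by omega) (by omega) (by omega) (by omega) hq

-- ===== VERDICT (by name: the statement is the Claim_ definition above) =====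
theorem Dart_separ_spec : Claim_equal_Dart_separ := by
  intro dart _
  show Dart_separ dart = Dart_separ_alt dart
  unfold Dart_separ Dart_separ_alt
  dsimp only
  cases hcs : dart.toList with
  | nil => simp [dartLoopA, PySem.List.pyRange, PySem.List.len, PySem.List.slice,
      PySem.List.clampIdx]
  | cons c rest =>
    have key := dart_main (c :: rest) ((c :: rest).length - 1) 1 0 [] (by omega)
      (by omega) (by omega) (by simp) (by simp)
    simp only [Nat.cast_one, Nat.cast_zero] at key
    simp only [List.drop_one, List.tail_cons] at key
    have hext : (c :: rest).extract 0 1 = [c] := by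
      simp [List.extract_eq_take_drop]
    rw [hext] at key
    simp only [PySem.List.len, List.length_cons]
    simp only [List.foldl_cons, dartStepB, List.isEmpty_nil, Bool.not_true,
      Bool.and_false, Bool.false_and, Bool.false_eq_true, if_false, List.nil_append]
    have hc1 : ((rest.length + 1 : Nat) : Int) = ((c :: rest).length : Int) := by simp
    rw [hc1]
    exact key
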